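-- pv_equiv track=rewrite | github.com/joaouli123/EmpresaDB | src/api/auth.py | validate_cpf
-- ===== SOURCE A (Python) =====
-- def validate_cpf(cpf: str) -> bool:
--     """Valida CPF usando algoritmo oficial"""
--     numbers = ''.join(filter(str.isdigit, cpf))
--     if len(numbers) != 11:
--         return False
--
--     # Verifica se todos os dígitos são iguais
--     if len(set(numbers)) == 1:
--         return False
--
--     # Validação do primeiro dígito verificador
--     sum_val = sum(int(numbers[i]) * (10 - i) for i in range(9))
--     digit1 = 11 - (sum_val % 11)
--     if digit1 >= 10:
--         digit1 = 0
--     if digit1 != int(numbers[9]):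
--         return False
--
--     # Validação do segundo dígito verificador
--     sum_val = sum(int(numbers[i]) * (11 - i) for i in range(10))
--     digit2 = 11 - (sum_val % 11)
--     if digit2 >= 10:
--         digit2 = 0
--     if digit2 != int(numbers[10]):
--         return False
--
--     return True
-- ===== SOURCE B (Python) =====
-- def validate_cpf(cpf: str) -> bool:
--     """Valida CPF via somas acumuladas duplas (sem pesos explicitos)."""
--     ds = [ord(c) - 48 for c in cpf if c.isdigit()]
--     if len(ds) != 11:
--         return False
--     if all(d == ds[0] for d in ds):
--         return False
--     # double running sums: after the first k digits, s + t == sum(ds[i]*(k+1-i))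
--     t = s = 0
--     for d in ds[:9]:
--         t += d
--         s += t
--     for pos in (9, 10):
--         if ds[pos] != -(s + t) % 11 % 10:
--             return False
--         t += ds[pos]
--         s += t
--     return True
-- ===== Notes on version B (the rewrite author's own statement) =====
-- stated objective: alternative
-- what changed: A uses a set() all-equal guard and two hardcoded weighted-sum passes with explicit weights (10-i)/(11-i) and the 11-(s%11)/>=10 rule; B has no weight table at all: it keeps a running sum t and a running sum-of-running-sums s (so s+t equals the needed weighted sum by a prefix-sum identity), checks both verifier positions in one loop over (9,10) on the growing prefix, derives each expected digit by the closed form -(s+t) % 11 % 10, and replaces the set() guard by an all-equal scan.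
import Mathlib
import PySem

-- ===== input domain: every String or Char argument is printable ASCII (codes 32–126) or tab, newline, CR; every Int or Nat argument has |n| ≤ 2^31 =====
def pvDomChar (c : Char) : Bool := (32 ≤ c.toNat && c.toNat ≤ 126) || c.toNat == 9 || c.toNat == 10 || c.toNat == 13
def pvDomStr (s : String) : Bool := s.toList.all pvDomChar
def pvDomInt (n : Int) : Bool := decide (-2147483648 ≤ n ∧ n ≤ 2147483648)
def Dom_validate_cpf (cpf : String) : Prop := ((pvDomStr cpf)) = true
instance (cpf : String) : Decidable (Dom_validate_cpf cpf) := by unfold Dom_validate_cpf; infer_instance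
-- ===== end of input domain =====

-- B drops A's explicit weight tables and set() guard: it keeps a running sum and a running
-- sum-of-running-sums (a prefix-sum identity yields the weighted sums), checks both verifier
-- positions in one loop on the growing prefix via -(s+t) % 11 % 10 (objective: alternative).

-- ===== PORT A =====
def validate_cpf (cpf : String) : Bool :=
  -- numbers = ''.join(filter(str.isdigit, cpf))  (Char.isDigit is exact for str.isdigit on the ASCII domain)
  let numbers : List Char := cpf.toList.filter (fun c => c.isDigit)
  if numbers.length ≠ 11 then false
  else if PySem.Set.len (PySem.Set.ofList numbers) == 1 then false
  else
    -- int(numbers[i]) of a digit char = its code - 48; indices are in range after the length-11 guard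
    let sum_val : Int :=
      ((List.range 9).map (fun i => (((numbers.getD i '0').toNat : Int) - 48) * (10 - (i : Int)))).sum
    let digit1 : Int := 11 - PySem.Int.mod sum_val 11
    let digit1 := if digit1 ≥ 10 then 0 else digit1
    if digit1 ≠ ((numbers.getD 9 '0').toNat : Int) - 48 then false
    else
      let sum_val : Int :=
        ((List.range 10).map (fun i => (((numbers.getD i '0').toNat : Int) - 48) * (11 - (i : Int)))).sum
      let digit2 : Int := 11 - PySem.Int.mod sum_val 11
      let digit2 := if digit2 ≥ 10 then 0 else digit2
      if digit2 ≠ ((numbers.getD 10 '0').toNat : Int) - 48 then false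
      else true

-- ===== PORT B =====
-- the 'for pos in (9, 10)' loop of Source B with its early return; indices are in range after the length-11 guard
def pvCheckLoop (ds : List Int) : List Nat → Int → Int → Bool
  | [], _, _ => true
  | pos :: rest, t, s =>
    if ds.getD pos 0 ≠ PySem.Int.mod (PySem.Int.mod (-(s + t)) 11) 10 then false
    else pvCheckLoop ds rest (t + ds.getD pos 0) (s + (t + ds.getD pos 0))

def validate_cpf_alt (cpf : String) : Bool :=
  -- ds = [ord(c) - 48 for c in cpf if c.isdigit()]
  let ds : List Int := (cpf.toList.filter (fun c => c.isDigit)).map (fun c => (c.toNat : Int) - 48)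
  if ds.length ≠ 11 then false
  else if ds.all (fun d => d == ds.getD 0 0) then false
  else
    -- for d in ds[:9]: t += d; s += t      (ds[:9] = take 9: exact for a nonnegative bound)
    let ts := (ds.take 9).foldl (fun (ts : Int × Int) d => (ts.1 + d, ts.2 + (ts.1 + d))) (0, 0)
    pvCheckLoop ds [9, 10] ts.1 ts.2

-- ===== PRECONDITION & SPEC =====
def Spec_validate_cpf (cpf : String) (out : Bool) : Prop := out = validate_cpf_alt cpf
instance (cpf : String) (out : Bool) : Decidable (Spec_validate_cpf cpf out) := by unfold Spec_validate_cpf; infer_instance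

-- ===== CLAIM (what is proved, stated in full; the proofs are below) =====
def Claim_equal_validate_cpf : Prop := ∀ (cpf : String), Dom_validate_cpf cpf → Spec_validate_cpf cpf (validate_cpf cpf)

-- ===== LEMMAS AND PROOFS =====

-- A's ">= 10 → 0" rule on 11 - s % 11 agrees with B's X % 11 % 10 form whenever X ≡ -s (mod 11)
lemma pv_digit_iff (s X d : Int) (h : (X + s) % 11 = 0) :
    ((if 10 ≤ 11 - s % 11 then (0:Int) else 11 - s % 11) = d) ↔ (d = X % 11 % 10) := by
  have hX : X % 11 = (11 - s % 11) % 11 := by omega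
  rw [hX]
  have h1 : 0 ≤ s % 11 := Int.emod_nonneg s (by norm_num)
  have h2 : s % 11 < 11 := Int.emod_lt_of_pos s (by norm_num)
  generalize hr : s % 11 = r at *
  interval_cases r <;> norm_num <;> omega

-- char equality transfers to the extracted digit values
lemma pv_char_int (a b : Char) :
    (((a.toNat : Int) - 48 == (b.toNat : Int) - 48)) = (a == b) := by
  rw [Bool.eq_iff_iff]
  simp only [beq_iff_eq]
  constructor
  · intro h
    have hn : a.toNat = b.toNat := by omega
    exact Char.ext (UInt32.toNat_inj.mp hn)
  · intro h; rw [h]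

-- len(set(a :: l)) == 1 iff every element of l equals a
lemma pv_set_len_one (a : Char) (l : List Char) :
    (PySem.Set.len (PySem.Set.ofList (a :: l)) == 1) = l.all (fun x => x == a) := by
  have hnd : (PySem.Set.ofList (a :: l)).Nodup := PySem.Set.nodup_ofList _
  have hmem : ∀ x : Char, x ∈ PySem.Set.ofList (a :: l) ↔ x ∈ a :: l :=
    fun x => PySem.Set.mem_ofList _ _
  have key : (PySem.Set.ofList (a :: l)).length = 1 ↔ ∀ x ∈ l, x = a := by
    constructor
    · intro h1 x hx
      obtain ⟨y, hy⟩ := List.length_eq_one_iff.1 h1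
      have hay : a = y := by have h := (hmem a).2 (by simp); rw [hy] at h; simpa using h
      have hxy : x = y := by have h := (hmem x).2 (by simp [hx]); rw [hy] at h; simpa using h
      rw [hxy, hay]
    · intro hall
      have hS : PySem.Set.ofList (a :: l) = [a] := by
        have hsub : ∀ x ∈ PySem.Set.ofList (a :: l), x = a := by
          intro x hx
          rcases List.mem_cons.mp ((hmem x).1 hx) with h | h
          · exact h
          · exact hall x h
        have haS : a ∈ PySem.Set.ofList (a :: l) := (hmem a).2 (by simp)
        rcases hSe : PySem.Set.ofList (a :: l) with _ | ⟨y, t⟩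
        · rw [hSe] at haS; simp at haS
        · rw [hSe] at hsub hnd
          have hy : y = a := hsub y (by simp)
          rcases t with _ | ⟨z, t⟩
          · simp [hy]
          · have hz : z = a := hsub z (by simp)
            rw [hy, hz] at hnd
            simp at hnd
      rw [hS, List.length_singleton]
  simp only [PySem.Set.len]
  by_cases hall : ∀ x ∈ l, x = a
  · have hlen := key.2 hall
    have h2 : l.all (fun x => x == a) = true := by
      rw [List.all_eq_true]; intro x hx; simpa using hall x hx
    rw [hlen, h2]; rfl
  · have h1 : (PySem.Set.ofList (a :: l)).length ≠ 1 := fun h => hall (key.1 h)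
    have h2 : l.all (fun x => x == a) = false := by
      rw [List.all_eq_false]
      push_neg at hall
      obtain ⟨x, hx, hxa⟩ := hall
      exact ⟨x, hx, by simpa using hxa⟩
    rw [h2]
    simpa using h1

lemma pv_main (cpf : String) : validate_cpf cpf = validate_cpf_alt cpf := by
  unfold validate_cpf validate_cpf_alt
  generalize cpf.toList.filter (fun c => c.isDigit) = ns
  by_cases hlen : ns.length = 11
  · rcases ns with _|⟨c0,_|⟨c1,_|⟨c2,_|⟨c3,_|⟨c4,_|⟨c5,_|⟨c6,_|⟨c7,_|⟨c8,_|⟨c9,_|⟨c10,_|⟨c11,tl⟩⟩⟩⟩⟩⟩⟩⟩⟩⟩⟩⟩ <;>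
      simp only [List.length_cons, List.length_nil] at hlen <;> try omega
    dsimp only
    rw [pv_set_len_one]
    simp [pvCheckLoop, List.range_succ, pv_char_int]
    rw [Bool.eq_iff_iff]
    simp only [Bool.and_eq_true, decide_eq_true_eq]
    exact and_congr Iff.rfl
      (and_congr (pv_digit_iff _ _ _ (by ring_nf; omega))
        (pv_digit_iff _ _ _ (by ring_nf; omega)))
  · simp [hlen]

-- ===== VERDICT (by name: the statement is the Claim_ definition above) =====
theorem validate_cpf_spec : Claim_equal_validate_cpf := by
  intro cpf _
  exact pv_main cpf
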